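-- pv_equiv track=rewrite | github.com/orgithu/Classes-repo | F.NSM230-25-26A/week6/temp..py | myXor
-- ===== SOURCE A (Python) =====
-- def myXor(a, b):
--     n = ord(a)
--     na = bin(n)[2:]
--     n1 = ord(b)
--     nb = bin(n1)[2:]
--     xorab = ''
--     # Ensure binary strings are of the same length for comparison if needed,
--     # though in the original image the loop depends on len(na).
--     # If the intent was to compare equal-length binary strings,
--     # padding might be needed here too.
--     # For now, following the original image's logic based on len(na)
--     # as the XOR operation is for two characters 'a' and 'o' that result in different length bin values.
--     # We will assume na and nb are derived from single characters and their lengths are sufficient for the loop.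
--
--     # Pad the shorter binary string if lengths differ, to ensure proper XOR logic across positions
--     max_len = max(len(na), len(nb))
--     na = na.zfill(max_len)
--     nb = nb.zfill(max_len)
--
--     for i in range(max_len): # Use max_len to iterate over the padded strings
--         if na[i] == nb[i]:
--             xorab += '0'
--         else:
--             xorab += '1'
--     return xorab
-- ===== SOURCE B (Python) =====
-- def myXor(a, b):
--     x, y = ord(a), ord(b)
--     width = max(x.bit_length(), y.bit_length())
--     return format(x ^ y, 'b').zfill(width)
-- ===== Notes on version B (the rewrite author's own statement) =====
-- stated objective: idiomatic
-- what changed: B replaces A's manual binary-string construction, zfill-padding and per-position character comparison loop with a single integer XOR formatted once as binary and padded to the max of the two bit lengths.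
import Mathlib
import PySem

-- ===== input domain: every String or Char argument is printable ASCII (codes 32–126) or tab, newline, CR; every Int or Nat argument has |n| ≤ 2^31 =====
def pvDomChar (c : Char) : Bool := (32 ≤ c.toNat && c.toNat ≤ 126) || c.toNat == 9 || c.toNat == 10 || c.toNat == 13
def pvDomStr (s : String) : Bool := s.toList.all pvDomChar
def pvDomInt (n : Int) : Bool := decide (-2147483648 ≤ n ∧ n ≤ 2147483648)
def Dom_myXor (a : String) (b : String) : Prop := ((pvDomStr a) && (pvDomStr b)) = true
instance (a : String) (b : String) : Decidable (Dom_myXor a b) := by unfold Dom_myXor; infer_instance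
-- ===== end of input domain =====

-- B differs by doing one integer XOR and one format+pad instead of A's bit-by-bit string loop (objective: idiomatic).

-- ===== PORT A =====
-- bin(n)[2:] built digit by digit, most significant first
-- fuel = n is enough since the argument halves each step
def pvBinDigitsAux : Nat → Nat → List Char
  | 0, _ => []
  | fuel + 1, n =>
    if n = 0 then []
    else pvBinDigitsAux fuel (n / 2) ++ [if n % 2 = 1 then '1' else '0']

def pvBinDigitsA (n : Nat) : List Char := pvBinDigitsAux (n + 1) n

def pvBinA (n : Nat) : List Char := if n = 0 then ['0'] else pvBinDigitsA n

-- the body of A for ord(a) = n, ord(b) = n1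
def pvCoreA (n n1 : Nat) : List Char :=
  let na := pvBinA n
  let nb := pvBinA n1
  let maxLen := max na.length nb.length
  let na := List.replicate (maxLen - na.length) '0' ++ na   -- na.zfill(max_len)
  let nb := List.replicate (maxLen - nb.length) '0' ++ nb
  (PySem.List.pyRange 0 (maxLen : Int) 1).foldl
    (fun xorab i =>
      if PySem.List.pyGet? na i = PySem.List.pyGet? nb i then xorab ++ ['0'] else xorab ++ ['1'])
    []

def myXor (a : String) (b : String) : String :=
  match a.toList, b.toList with
  | [ca], [cb] => String.ofList (pvCoreA ca.toNat cb.toNat)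
  | _, _ => ""   -- ord raises TypeError here; excluded by Pre_myXor

-- ===== PORT B =====
-- fuel = n is enough since the argument halves each step
def pvBitLenAux : Nat → Nat → Nat
  | 0, _ => 0
  | fuel + 1, n => if n = 0 then 0 else pvBitLenAux fuel (n / 2) + 1

def pvBitLen (n : Nat) : Nat := pvBitLenAux (n + 1) n

def pvCoreB (x y : Nat) : List Char :=
  let width := max (pvBitLen x) (pvBitLen y)
  let s := Nat.toDigits 2 (x ^^^ y)          -- format(x ^ y, 'b')
  List.replicate (width - s.length) '0' ++ s   -- .zfill(width)

def myXor_alt (a : String) (b : String) : String :=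
  let la := a.toList
  let lb := b.toList
  if la.length = 1 ∧ lb.length = 1 then
    String.ofList (pvCoreB (la.headD ' ').toNat (lb.headD ' ').toNat)
  else ""   -- ord raises TypeError here; excluded by Pre_myXor

-- ===== PRECONDITION & SPEC =====
-- Pre_ excludes inputs where ord() raises TypeError: both arguments must be single characters.
def Pre_myXor (a : String) (b : String) : Prop := a.toList.length = 1 ∧ b.toList.length = 1
instance (a : String) (b : String) : Decidable (Pre_myXor a b) := by unfold Pre_myXor; infer_instance
def pvWitness_myXor : String × String := ("a", "o")

def Spec_myXor (a : String) (b : String) (out : String) : Prop := out = myXor_alt a b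
instance (a : String) (b : String) (out : String) : Decidable (Spec_myXor a b out) := by unfold Spec_myXor; infer_instance

-- ===== CLAIM (what is proved, stated in full; the proofs are below) =====
def Claim_equal_myXor : Prop := ∀ (a : String) (b : String), Dom_myXor a b → Pre_myXor a b → Spec_myXor a b (myXor a b)

-- ===== LEMMAS AND PROOFS =====
-- pvBits L n: the width-L binary representation of n (MSB first); both cores reduce to it.
def pvBits : Nat → Nat → List Char
  | 0, _ => []
  | L + 1, n => pvBits L (n / 2) ++ [if n % 2 = 1 then '1' else '0']

theorem length_pvBits (L : Nat) : ∀ n, (pvBits L n).length = L := by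
  induction L with
  | zero => intro n; rfl
  | succ L ih => intro n; simp [pvBits, ih]

theorem pvBitLenAux_irrel : ∀ f g n, n ≤ f → n ≤ g → pvBitLenAux f n = pvBitLenAux g n := by
  intro f
  induction f with
  | zero =>
    intro g n hf _
    interval_cases n
    cases g <;> simp [pvBitLenAux]
  | succ f ih =>
    intro g n hf hg
    cases g with
    | zero => interval_cases n; simp [pvBitLenAux]
    | succ g =>
      by_cases h0 : n = 0
      · simp [pvBitLenAux, h0]
      · simp only [pvBitLenAux, h0, if_false]
        have hd : n / 2 < n := Nat.div_lt_self (Nat.pos_of_ne_zero h0) (by omega)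
        rw [ih g (n / 2) (by omega) (by omega)]

theorem pvBitLen_eq (n : Nat) : pvBitLen n = if n = 0 then 0 else pvBitLen (n / 2) + 1 := by
  by_cases h0 : n = 0
  · subst h0; rfl
  · rw [if_neg h0]
    show pvBitLenAux (n + 1) n = _
    rw [show pvBitLenAux (n + 1) n = if n = 0 then 0 else pvBitLenAux n (n / 2) + 1 from rfl,
      if_neg h0, pvBitLenAux_irrel n (n / 2 + 1) (n / 2) (Nat.div_le_self n 2) (by omega)]
    rfl

theorem pvBitLen_zero : pvBitLen 0 = 0 := by simp [pvBitLen_eq]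

theorem pvBitLen_pos {n : Nat} (h : n ≠ 0) : 1 ≤ pvBitLen n := by
  rw [pvBitLen_eq]; simp [h]

theorem lt_two_pow_pvBitLen : ∀ n, n < 2 ^ pvBitLen n := by
  intro n
  induction n using Nat.strong_induction_on with
  | _ n ih =>
    by_cases h0 : n = 0
    · simp [h0, pvBitLen_zero]
    · have hd : n / 2 < n := Nat.div_lt_self (Nat.pos_of_ne_zero h0) (by omega)
      have := ih (n / 2) hd
      rw [pvBitLen_eq]
      simp only [h0, if_false, pow_succ]
      omega

theorem pvBitLen_le {n L : Nat} (h : n < 2 ^ L) : pvBitLen n ≤ L := by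
  induction n using Nat.strong_induction_on generalizing L with
  | _ n ih =>
    by_cases h0 : n = 0
    · simp [h0, pvBitLen_zero]
    · have hd : n / 2 < n := Nat.div_lt_self (Nat.pos_of_ne_zero h0) (by omega)
      have hL : L ≠ 0 := by
        rintro rfl
        rw [pow_zero] at h
        omega
      obtain ⟨L', rfl⟩ := Nat.exists_eq_succ_of_ne_zero hL
      have hh : n / 2 < 2 ^ L' := by
        rw [pow_succ] at h; omega
      have := ih (n / 2) hd hh
      rw [pvBitLen_eq]
      simp only [h0, if_false]
      omega

theorem lt_two_pow_max_one (n : Nat) : n < 2 ^ max 1 (pvBitLen n) := by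
  exact lt_of_lt_of_le (lt_two_pow_pvBitLen n)
    (Nat.pow_le_pow_right (by omega) (le_max_right _ _))

theorem pvBits_cons_zero : ∀ L n, n < 2 ^ L → pvBits (L + 1) n = '0' :: pvBits L n := by
  intro L
  induction L with
  | zero =>
    intro n h
    interval_cases n
    rfl
  | succ L ih =>
    intro n h
    have hh : n / 2 < 2 ^ L := by
      rw [pow_succ] at h; omega
    show pvBits (L + 1) (n / 2) ++ [if n % 2 = 1 then '1' else '0'] = _
    rw [ih (n / 2) hh]
    rfl

theorem pvBits_pad (k : Nat) : ∀ L n, n < 2 ^ L →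
    List.replicate k '0' ++ pvBits L n = pvBits (k + L) n := by
  induction k with
  | zero => intro L n _; simp
  | succ k ih =>
    intro L n h
    have h2 : n < 2 ^ (k + L) :=
      lt_of_lt_of_le h (Nat.pow_le_pow_right (by omega) (by omega))
    rw [List.replicate_succ, List.cons_append, ih L n h,
      show k + 1 + L = (k + L) + 1 by omega, pvBits_cons_zero _ _ h2]

theorem pvBinDigitsAux_eq : ∀ fuel n, n ≤ fuel →
    pvBinDigitsAux fuel n = pvBits (pvBitLen n) n := by
  intro fuel
  induction fuel with
  | zero =>
    intro n h
    interval_cases n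
    simp [pvBinDigitsAux, pvBitLen_zero, pvBits]
  | succ fuel ih =>
    intro n h
    by_cases h0 : n = 0
    · simp [pvBinDigitsAux, h0, pvBitLen_zero, pvBits]
    · have hd : n / 2 < n := Nat.div_lt_self (Nat.pos_of_ne_zero h0) (by omega)
      simp only [pvBinDigitsAux, h0, if_false]
      rw [ih (n / 2) (by omega)]
      conv_rhs => rw [pvBitLen_eq n]
      rw [if_neg h0]
      rfl

theorem pvBinA_eq (n : Nat) : pvBinA n = pvBits (max 1 (pvBitLen n)) n := by
  by_cases h0 : n = 0
  · simp [pvBinA, h0, pvBitLen_zero, pvBits]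
  · have h1 := pvBitLen_pos h0
    rw [pvBinA, if_neg h0, pvBinDigitsA, pvBinDigitsAux_eq (n + 1) n (by omega),
      max_eq_right h1]

theorem toDigitsCore_eq : ∀ fuel n ds, n < 2 ^ fuel → 1 ≤ fuel →
    Nat.toDigitsCore 2 fuel n ds = pvBits (max 1 (pvBitLen n)) n ++ ds := by
  intro fuel
  induction fuel with
  | zero => intro n ds _ h1; omega
  | succ fuel ih =>
    intro n ds hn _
    by_cases h2 : n / 2 = 0
    · have : n ≤ 1 := by omega
      interval_cases n <;> simp [Nat.toDigitsCore, pvBitLen_eq, pvBits, Nat.digitChar]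
    · have hfuel : 1 ≤ fuel := by
        by_contra h
        have : fuel = 0 := by omega
        subst this
        simp at hn
        omega
      have hh : n / 2 < 2 ^ fuel := by
        rw [pow_succ] at hn; omega
      have h0 : n ≠ 0 := by omega
      simp only [Nat.toDigitsCore, h2, if_false]
      rw [ih (n / 2) _ hh hfuel]
      have hb2 : 1 ≤ pvBitLen (n / 2) := pvBitLen_pos h2
      rw [pvBitLen_eq n]
      simp only [h0, if_false]
      rw [max_eq_right hb2, max_eq_right (by omega : 1 ≤ pvBitLen (n / 2) + 1)]
      show _ = (pvBits (pvBitLen (n / 2)) (n / 2) ++ [if n % 2 = 1 then '1' else '0']) ++ ds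
      rw [List.append_assoc]
      congr 1
      have : n % 2 = 0 ∨ n % 2 = 1 := Nat.mod_two_eq_zero_or_one n
      rcases this with h | h <;> simp [h, Nat.digitChar]

theorem toDigits_eq (n : Nat) : Nat.toDigits 2 n = pvBits (max 1 (pvBitLen n)) n := by
  have h : n < 2 ^ (n + 1) :=
    lt_of_lt_of_le Nat.lt_two_pow_self (Nat.pow_le_pow_right (by omega) (by omega))
  rw [Nat.toDigits, toDigitsCore_eq (n + 1) n [] h (by omega), List.append_nil]

theorem getElem?_pvBits : ∀ L n k, k < L →
    (pvBits L n)[k]? = some (if n.testBit (L - 1 - k) then '1' else '0') := by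
  intro L
  induction L with
  | zero => intro n k hk; omega
  | succ L ih =>
    intro n k hk
    by_cases h : k < L
    · rw [show pvBits (L + 1) n = pvBits L (n / 2) ++ [if n % 2 = 1 then '1' else '0'] from rfl]
      rw [List.getElem?_append_left (by rw [length_pvBits]; exact h)]
      rw [ih (n / 2) k h]
      rw [show L + 1 - 1 - k = (L - 1 - k) + 1 by omega, Nat.testBit_succ]
    · have hkL : k = L := by omega
      subst hkL
      rw [show pvBits (k + 1) n = pvBits k (n / 2) ++ [if n % 2 = 1 then '1' else '0'] from rfl]
      rw [List.getElem?_append_right (length_pvBits k (n / 2)).le]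
      rcases Nat.mod_two_eq_zero_or_one n with h | h <;>
        simp [length_pvBits, Nat.testBit_zero, h]

-- A's per-position comparison loop over the two padded strings computes pvBits L (x ^^^ y)
theorem coreA_char (x y : Nat) :
    pvCoreA x y = pvBits (max (max 1 (pvBitLen x)) (max 1 (pvBitLen y))) (x ^^^ y) := by
  have hx := lt_two_pow_max_one x
  have hy := lt_two_pow_max_one y
  set Mx := max 1 (pvBitLen x) with hMx
  set My := max 1 (pvBitLen y) with hMy
  set L := max Mx My with hL
  have hxL : x < 2 ^ L :=
    lt_of_lt_of_le hx (Nat.pow_le_pow_right (by omega) (le_max_left _ _))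
  have hyL : y < 2 ^ L :=
    lt_of_lt_of_le hy (Nat.pow_le_pow_right (by omega) (le_max_right _ _))
  have hna : List.replicate (L - Mx) '0' ++ pvBits Mx x = pvBits L x := by
    rw [pvBits_pad _ _ _ hx, show L - Mx + Mx = L by omega]
  have hnb : List.replicate (L - My) '0' ++ pvBits My y = pvBits L y := by
    rw [pvBits_pad _ _ _ hy, show L - My + My = L by omega]
  show (PySem.List.pyRange 0 (↑(max (pvBinA x).length (pvBinA y).length)) 1).foldl _ [] = _
  rw [pvBinA_eq, pvBinA_eq, length_pvBits, length_pvBits, ← hMx, ← hMy, ← hL, hna, hnb]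
  rw [show (fun (xorab : List Char) (i : Int) =>
        if PySem.List.pyGet? (pvBits L x) i = PySem.List.pyGet? (pvBits L y) i
        then xorab ++ ['0'] else xorab ++ ['1']) =
      fun (xorab : List Char) (i : Int) =>
        xorab ++ [if PySem.List.pyGet? (pvBits L x) i = PySem.List.pyGet? (pvBits L y) i
                  then '0' else '1'] by
    funext a i; split <;> rfl]
  rw [PySem.List.foldl_append_singleton_eq_map, List.nil_append]
  rw [PySem.List.pyRange_one, List.map_map, show (((L : Int) - 0).toNat) = L by simp]
  apply List.ext_getElem?
  intro k
  by_cases hkL : k < L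
  · rw [List.getElem?_map, List.getElem?_range hkL, getElem?_pvBits L (x ^^^ y) k hkL]
    simp only [Option.map_some, Function.comp_apply, zero_add]
    rw [PySem.List.pyGet?_natCast, PySem.List.pyGet?_natCast,
      getElem?_pvBits L x k hkL, getElem?_pvBits L y k hkL, Nat.testBit_xor]
    rcases Bool.eq_false_or_eq_true (x.testBit (L - 1 - k)) with h1 | h1 <;>
      rcases Bool.eq_false_or_eq_true (y.testBit (L - 1 - k)) with h2 | h2 <;>
        simp [h1, h2]
  · rw [List.getElem?_eq_none (by simp; omega), List.getElem?_eq_none (by rw [length_pvBits]; omega)]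

-- B's single format+pad also computes pvBits L (x ^^^ y)
theorem coreB_char (x y : Nat) :
    pvCoreB x y = pvBits (max (max 1 (pvBitLen x)) (max 1 (pvBitLen y))) (x ^^^ y) := by
  set m := x ^^^ y with hm
  set W := max (pvBitLen x) (pvBitLen y) with hW
  have hLW : max (max 1 (pvBitLen x)) (max 1 (pvBitLen y)) = max 1 W := by omega
  show List.replicate (W - (Nat.toDigits 2 m).length) '0' ++ Nat.toDigits 2 m = _
  rw [hLW, toDigits_eq, length_pvBits]
  rcases Nat.eq_zero_or_pos W with h0 | hpos
  · have hbx : pvBitLen x = 0 := by omega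
    have hby : pvBitLen y = 0 := by omega
    have hx0 : x = 0 := by
      have := lt_two_pow_pvBitLen x
      rw [hbx, pow_zero] at this
      omega
    have hy0 : y = 0 := by
      have := lt_two_pow_pvBitLen y
      rw [hby, pow_zero] at this
      omega
    have hm0 : m = 0 := by rw [hm, hx0, hy0]; simp
    rw [h0, hm0]
    simp [pvBitLen_zero]
  · have hxW : x < 2 ^ W :=
      lt_of_lt_of_le (lt_two_pow_pvBitLen x)
        (Nat.pow_le_pow_right (by omega) (le_max_left _ _))
    have hyW : y < 2 ^ W :=
      lt_of_lt_of_le (lt_two_pow_pvBitLen y)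
        (Nat.pow_le_pow_right (by omega) (le_max_right _ _))
    have hmW : m < 2 ^ W := Nat.xor_lt_two_pow hxW hyW
    have hbm : pvBitLen m ≤ W := pvBitLen_le hmW
    have hMm : max 1 (pvBitLen m) ≤ W := by omega
    rw [pvBits_pad _ _ _ (lt_two_pow_max_one m),
      show W - max 1 (pvBitLen m) + max 1 (pvBitLen m) = W by omega,
      max_eq_right (by omega : 1 ≤ W)]

theorem pvCore_eq (x y : Nat) : pvCoreA x y = pvCoreB x y := by
  rw [coreA_char, coreB_char]

-- ===== VERDICT (by name: the statement is the Claim_ definition above) =====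
theorem myXor_spec : Claim_equal_myXor := by
  intro a b _ hpre
  obtain ⟨ha, hb⟩ := hpre
  match h1 : a.toList, h2 : b.toList with
  | [ca], [cb] =>
    unfold Spec_myXor myXor myXor_alt
    rw [h1, h2]
    simp only [List.length_cons, List.length_nil, List.headD_cons, and_self, if_true]
    exact congrArg String.ofList (pvCore_eq ca.toNat cb.toNat)
  | [], _ => simp [h1] at ha
  | _ :: _ :: _, _ => simp [h1] at ha
  | [_], [] => simp [h2] at hb
  | [_], _ :: _ :: _ => simp [h2] at hb
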